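-- pv_equiv track=rewrite | github.com/logpie/otto | otto/mission_control/service.py | _specific_failure_reason
-- ===== SOURCE A (Python) =====
-- def _specific_failure_reason(excerpt: str | None) -> str | None:
--     if not excerpt:
--         return None
--     for line in excerpt.splitlines():
--         stripped = _strip_queue_log_prefix(line.strip())
--         if not stripped or stripped.startswith("Primary session log"):
--             continue
--         if "Fatal Python error" in stripped:
--             return stripped
--         if "OSError:" in stripped:
--             return stripped
--     for line in reversed(excerpt.splitlines()):
--         stripped = _strip_queue_log_prefix(line.strip())
--         if "exit_code=" in stripped or "failed" in stripped.lower():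
--             return stripped
--     return None
--
-- def _strip_queue_log_prefix(line: str) -> str:
--     if line.startswith("[") and "] " in line:
--         return line.split("] ", 1)[1].strip()
--     return line
-- ===== SOURCE B (Python) =====
-- def _strip_queue_log_prefix(line: str) -> str:
--     if line.startswith("[") and "] " in line:
--         return line.split("] ", 1)[1].strip()
--     return line
--
-- def _specific_failure_reason(excerpt: str | None) -> str | None:
--     if not excerpt:
--         return None
--     first_fatal = None
--     last_exit = None
--     for line in excerpt.splitlines():
--         stripped = _strip_queue_log_prefix(line.strip())
--         if (first_fatal is None and stripped
--                 and not stripped.startswith("Primary session log")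
--                 and ("Fatal Python error" in stripped or "OSError:" in stripped)):
--             first_fatal = stripped
--         if "exit_code=" in stripped or "failed" in stripped.lower():
--             last_exit = stripped
--     return first_fatal if first_fatal is not None else last_exit
-- ===== Notes on version B (the rewrite author's own statement) =====
-- stated objective: alternative
-- what changed: Replaced A's two passes over the lines (a forward scan returning the first fatal line, then a scan over the reversed list returning the last exit_code=/failed line) by a single forward pass that maintains both candidates (first_fatal, last_exit) and combines them at the end.
import Mathlib
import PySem

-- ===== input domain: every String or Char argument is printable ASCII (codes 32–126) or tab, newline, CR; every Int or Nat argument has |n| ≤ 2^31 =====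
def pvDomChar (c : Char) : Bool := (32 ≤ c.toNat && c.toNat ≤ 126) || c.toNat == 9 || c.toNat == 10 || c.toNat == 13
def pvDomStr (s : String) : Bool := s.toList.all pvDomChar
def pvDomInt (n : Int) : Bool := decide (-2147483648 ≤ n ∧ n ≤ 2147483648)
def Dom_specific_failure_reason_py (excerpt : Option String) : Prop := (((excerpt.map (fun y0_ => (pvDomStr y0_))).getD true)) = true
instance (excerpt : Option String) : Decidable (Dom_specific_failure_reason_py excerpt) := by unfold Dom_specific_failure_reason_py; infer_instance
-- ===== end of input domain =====

-- B replaces A's two passes (forward scan for the first fatal line, reversed scan for the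
-- last exit/failed line) by a single forward fold maintaining both candidates; same return value.

-- ===== PORT A =====
-- _strip_queue_log_prefix (shared helper of both Pythons)
def sfrStrip (line : String) : String :=
  if PySem.Str.startswith line "[" && PySem.Str.isIn "] " line then
    PySem.Str.strip (((PySem.Str.splitMax? line "] " 1).getD []).getD 1 "")
  else line

-- first for-loop of A: first non-blank, non-"Primary session log" line containing a fatal pattern
def sfrFatal : List String → Option String
  | [] => none
  | l :: ls =>
    let s := sfrStrip (PySem.Str.strip l)
    if s = "" || PySem.Str.startswith s "Primary session log" then sfrFatal ls
    else if PySem.Str.isIn "Fatal Python error" s then some s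
    else if PySem.Str.isIn "OSError:" s then some s
    else sfrFatal ls

-- second for-loop of A (applied to the reversed line list)
def sfrExit : List String → Option String
  | [] => none
  | l :: ls =>
    let s := sfrStrip (PySem.Str.strip l)
    if PySem.Str.isIn "exit_code=" s || PySem.Str.isIn "failed" (PySem.Str.lower s) then some s
    else sfrExit ls

def specific_failure_reason_py (excerpt : Option String) : Option String :=
  match excerpt with
  | none => none
  | some e =>
    if e = "" then none
    else
      match sfrFatal (PySem.Str.splitlines e) with
      | some s => some s
      | none => sfrExit (PySem.Str.splitlines e).reverse

-- ===== PORT B =====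
-- one step of B's single forward pass: state = (first_fatal, last_exit)
def sfrStep (st : Option String × Option String) (line : String) : Option String × Option String :=
  let s := sfrStrip (PySem.Str.strip line)
  let ff := if st.1.isNone && !(s == "") && !PySem.Str.startswith s "Primary session log"
               && (PySem.Str.isIn "Fatal Python error" s || PySem.Str.isIn "OSError:" s)
            then some s else st.1
  let le := if PySem.Str.isIn "exit_code=" s || PySem.Str.isIn "failed" (PySem.Str.lower s)
            then some s else st.2
  (ff, le)

def specific_failure_reason_py_alt (excerpt : Option String) : Option String :=
  match excerpt with
  | none => none
  | some e =>
    if e = "" then none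
    else
      let st := (PySem.Str.splitlines e).foldl sfrStep (none, none)
      match st.1 with
      | some s => some s
      | none => st.2

-- ===== PRECONDITION & SPEC =====
def Spec_specific_failure_reason_py (excerpt : Option String) (out : Option String) : Prop := out = specific_failure_reason_py_alt excerpt
instance (excerpt : Option String) (out : Option String) : Decidable (Spec_specific_failure_reason_py excerpt out) := by unfold Spec_specific_failure_reason_py; infer_instance

-- ===== CLAIM (what is proved, stated in full; the proofs are below) =====
def Claim_equal_specific_failure_reason_py : Prop := ∀ (excerpt : Option String), Dom_specific_failure_reason_py excerpt → Spec_specific_failure_reason_py excerpt (specific_failure_reason_py excerpt)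

-- ===== LEMMAS AND PROOFS =====

-- appending one line to the reversed-scan loop of A: last match wins
theorem sfrExit_append (xs : List String) (l : String) :
    sfrExit (xs ++ [l]) = (sfrExit xs).or (sfrExit [l]) := by
  induction xs with
  | nil => simp [sfrExit]
  | cons x xs ih =>
    simp only [List.cons_append, sfrExit]
    split
    · simp
    · rw [ih]
      congr 1

set_option maxHeartbeats 1000000 in
-- B's fold computes A's two scans: fst = ff.or (first fatal), snd = (last exit).or le
theorem sfrFold_spec (ls : List String) (ff le : Option String) :
    ls.foldl sfrStep (ff, le) = (ff.or (sfrFatal ls), (sfrExit ls.reverse).or le) := by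
  induction ls generalizing ff le with
  | nil => simp [sfrFatal, sfrExit]
  | cons l ls ih =>
    rw [List.foldl_cons, ih]
    have hrev : (l :: ls).reverse = ls.reverse ++ [l] := by simp
    rw [hrev, sfrExit_append]
    simp only [Prod.mk.injEq]
    refine ⟨?_, ?_⟩
    · -- first components
      show (sfrStep (ff, le) l).1.or (sfrFatal ls) = ff.or (sfrFatal (l :: ls))
      cases ff with
      | some x => simp [sfrStep]
      | none =>
        simp only [sfrStep, sfrFatal, Option.isNone_none, Bool.true_and, Option.none_or]
        generalize sfrStrip (PySem.Str.strip l) = s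
        cases hP : PySem.Str.startswith s "Primary session log" <;>
          cases hF : PySem.Str.isIn "Fatal Python error" s <;>
          cases hO : PySem.Str.isIn "OSError:" s <;>
          by_cases he : s = "" <;>
          simp [he]
    · -- second components
      show (sfrExit ls.reverse).or (sfrStep (ff, le) l).2
          = ((sfrExit ls.reverse).or (sfrExit [l])).or le
      rw [Option.or_assoc]
      cases sfrExit ls.reverse with
      | some v => simp
      | none =>
        simp only [Option.none_or]
        simp only [sfrStep, sfrExit]
        split <;> simp

-- ===== VERDICT (by name: the statement is the Claim_ definition above) =====
theorem specific_failure_reason_py_spec : Claim_equal_specific_failure_reason_py := by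
  intro excerpt _
  unfold Spec_specific_failure_reason_py specific_failure_reason_py specific_failure_reason_py_alt
  cases excerpt with
  | none => rfl
  | some e =>
    by_cases he : e = ""
    · simp [he]
    · simp only [he, if_false]
      rw [sfrFold_spec]
      simp
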